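-- pv_equiv track=rewrite | github.com/puyopop/atcoder-workspace | abc100/C/main.py | solve
-- ===== SOURCE A (Python) =====
-- def solve(N: int, a: "List[int]"):
--     def f(n):
--         res = 0
--         while n % 2 == 0:
--             n //= 2
--             res += 1
--         return res
--     return sum(map(f, a))
-- ===== SOURCE B (Python) =====
-- def solve(N: int, a: "List[int]"):
--     # Layered counting: round k keeps (halved) the elements divisible by 2^k,
--     # and each surviving element contributes one factor of 2 per round.
--     res = 0
--     work = a
--     while work:
--         evens = [x // 2 for x in work if x % 2 == 0]
--         res += len(evens)
--         work = evens
--     return res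
-- ===== Notes on version B (the rewrite author's own statement) =====
-- stated objective: alternative
-- what changed: B counts the factors of 2 layer by layer over the whole list (round k counts and halves the elements divisible by 2^k) instead of A's per-element while-loop factorizations summed; Pre_ excludes lists containing 0, on which both programs loop forever.
import Mathlib
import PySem

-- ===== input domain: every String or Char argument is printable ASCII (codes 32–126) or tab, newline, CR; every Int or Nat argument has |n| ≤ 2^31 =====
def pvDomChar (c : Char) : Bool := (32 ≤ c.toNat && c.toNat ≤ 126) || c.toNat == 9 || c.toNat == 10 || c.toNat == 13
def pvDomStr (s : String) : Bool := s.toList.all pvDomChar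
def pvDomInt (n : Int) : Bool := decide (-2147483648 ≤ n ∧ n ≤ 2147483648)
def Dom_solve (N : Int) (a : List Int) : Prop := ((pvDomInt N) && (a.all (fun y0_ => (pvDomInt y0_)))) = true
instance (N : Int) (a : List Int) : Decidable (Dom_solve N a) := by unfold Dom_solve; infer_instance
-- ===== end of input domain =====

-- B counts factors of 2 layer by layer over the whole list (round k counts and halves the
-- elements divisible by 2^k) instead of A's per-element while loops summed; objective:
-- alternative algorithm, not faster. Pre_ excludes lists containing 0, on which both
-- Pythons loop forever.


-- ===== PORT A =====
-- the inner 'while n % 2 == 0: n //= 2; res += 1' loop, fuel-bounded: for n ≠ 0 the fuel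
-- n.natAbs exceeds the number of iterations, so this computes exactly the Python loop;
-- at n = 0 the Python loop diverges (excluded by Pre_solve).
def countTwosGo : Nat → Int → Int
  | 0, _ => 0
  | fuel + 1, n =>
      if PySem.Int.mod n 2 = 0 then countTwosGo fuel (PySem.Int.floordiv n 2) + 1 else 0

def countTwos (n : Int) : Int := countTwosGo n.natAbs n

def solve (N : Int) (a : List Int) : Int := (a.map countTwos).sum

-- ===== PORT B =====
-- the 'while work:' loop of Source B, fuel-bounded: one round builds the halved even elements,
-- adds their count, and recurses; for lists of nonzero elements the total |·|-sum strictly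
-- drops each productive round, so fuel sum+1 suffices (0 ∈ a, where the Python diverges,
-- is excluded by Pre_solve).
def layersGo : Nat → Int → List Int → Int
  | _, res, [] => res
  | 0, res, _ :: _ => res
  | fuel + 1, res, w :: ws =>
      let evens := ((w :: ws).filter (fun x => PySem.Int.mod x 2 = 0)).map
        (fun x => PySem.Int.floordiv x 2)
      layersGo fuel (res + evens.length) evens

def solve_alt (N : Int) (a : List Int) : Int :=
  layersGo ((a.map Int.natAbs).sum + 1) 0 a

-- ===== PRECONDITION & SPEC =====
-- Pre_ excludes lists containing 0: there A's inner while loop (and B's layered loop, which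
-- keeps 0 forever) never terminates, so A returns on exactly the inputs Pre_ admits.
def Pre_solve (N : Int) (a : List Int) : Prop := ∀ x ∈ a, x ≠ 0
instance (N : Int) (a : List Int) : Decidable (Pre_solve N a) := by unfold Pre_solve; infer_instance

def pvWitness_solve : Int × List Int := (3, [2, 4, 7])

def Spec_solve (N : Int) (a : List Int) (out : Int) : Prop := out = solve_alt N a
instance (N : Int) (a : List Int) (out : Int) : Decidable (Spec_solve N a out) := by unfold Spec_solve; infer_instance

-- ===== CLAIM (what is proved, stated in full; the proofs are below) =====
def Claim_equal_solve : Prop := ∀ (N : Int) (a : List Int), Dom_solve N a → Pre_solve N a → Spec_solve N a (solve N a)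

-- ===== LEMMAS AND PROOFS =====

-- 2-adic valuation, the common yardstick of both proofs
def v2 (n : Int) : Int := (padicValNat 2 n.natAbs : Int)

theorem even_split (x : Int) (hx : x ≠ 0) (h2 : PySem.Int.mod x 2 = 0) :
    PySem.Int.floordiv x 2 ≠ 0 ∧ x = 2 * PySem.Int.floordiv x 2 := by
  have hdvd : (2 : Int) ∣ x := (PySem.Int.mod_eq_zero_iff_dvd x 2).mp h2
  obtain ⟨m, hm⟩ := hdvd
  have hdiv : PySem.Int.floordiv x 2 = m := by
    rw [PySem.Int.floordiv_eq_ediv_of_pos (by norm_num)]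
    omega
  constructor
  · rw [hdiv]; rintro rfl; simp at hm; exact hx hm
  · rw [hdiv]; exact hm

theorem v2_even (x : Int) (hx : x ≠ 0) (h2 : PySem.Int.mod x 2 = 0) :
    v2 x = v2 (PySem.Int.floordiv x 2) + 1 := by
  obtain ⟨hm0, hm⟩ := even_split x hx h2
  set m := PySem.Int.floordiv x 2 with hmdef
  have hnat : x.natAbs = 2 * m.natAbs := by omega
  have hval : padicValNat 2 (2 * m.natAbs) = padicValNat 2 m.natAbs + 1 := by
    rw [padicValNat.mul (by norm_num) (Int.natAbs_ne_zero.mpr hm0),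
        padicValNat.self (by norm_num)]
    omega
  unfold v2
  rw [hnat, hval]
  push_cast; ring

theorem v2_odd (x : Int) (h2 : ¬ PySem.Int.mod x 2 = 0) : v2 x = 0 := by
  have hnd : ¬ (2 : Nat) ∣ x.natAbs := by
    intro hd
    exact h2 ((PySem.Int.mod_eq_zero_iff_dvd x 2).mpr (Int.natAbs_dvd_natAbs.mp hd))
  unfold v2
  rw [padicValNat.eq_zero_of_not_dvd hnd]
  rfl

-- A's inner loop computes v2, for n ≠ 0 and enough fuel
theorem countTwosGo_eq (fuel : Nat) :
    ∀ n : Int, n ≠ 0 → n.natAbs ≤ fuel → countTwosGo fuel n = v2 n := by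
  induction fuel with
  | zero =>
      intro n hn hle
      have : n.natAbs ≠ 0 := Int.natAbs_ne_zero.mpr hn
      omega
  | succ f ih =>
      intro n hn hle
      by_cases h2 : PySem.Int.mod n 2 = 0
      · obtain ⟨hm0, hm⟩ := even_split n hn h2
        have hnat : n.natAbs = 2 * (PySem.Int.floordiv n 2).natAbs := by omega
        have hmle : (PySem.Int.floordiv n 2).natAbs ≤ f := by
          have : (PySem.Int.floordiv n 2).natAbs ≠ 0 := Int.natAbs_ne_zero.mpr hm0
          omega
        simp only [countTwosGo, h2, if_true, ih _ hm0 hmle, v2_even n hn h2]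
      · simp only [countTwosGo, h2, if_false, v2_odd n h2]

theorem countTwos_eq (n : Int) (hn : n ≠ 0) : countTwos n = v2 n :=
  countTwosGo_eq n.natAbs n hn le_rfl

-- one layer of B's loop preserves 'res + Σ v2' and keeps elements nonzero
theorem layer_sum (work : List Int) (h : ∀ x ∈ work, x ≠ 0) :
    (work.map v2).sum =
      (((work.filter (fun x => PySem.Int.mod x 2 = 0)).map (fun x => PySem.Int.floordiv x 2)).length : Int)
      + (((work.filter (fun x => PySem.Int.mod x 2 = 0)).map (fun x => PySem.Int.floordiv x 2)).map v2).sum := by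
  induction work with
  | nil => simp
  | cons x t ih =>
      have hx : x ≠ 0 := h x (List.mem_cons_self ..)
      have ht := ih (fun y hy => h y (List.mem_cons_of_mem _ hy))
      by_cases h2 : PySem.Int.mod x 2 = 0
      · simp only [List.map_cons, List.sum_cons, List.filter_cons, h2, decide_true,
          if_true, List.length_cons, v2_even x hx h2, ht]
        push_cast; ring
      · simp only [List.map_cons, List.sum_cons, List.filter_cons, decide_eq_true_eq, h2,
          if_false, v2_odd x h2, ht]
        ring

theorem layer_nonzero (work : List Int) (h : ∀ x ∈ work, x ≠ 0) :
    ∀ y ∈ (work.filter (fun x => PySem.Int.mod x 2 = 0)).map (fun x => PySem.Int.floordiv x 2),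
      y ≠ 0 := by
  intro y hy
  obtain ⟨x, hxmem, rfl⟩ := List.mem_map.mp hy
  have hx := List.mem_filter.mp hxmem
  exact (even_split x (h x hx.1) (of_decide_eq_true hx.2)).1

-- a productive layer strictly shrinks the |·|-sum (counting the layer's length too)
theorem layer_shrinks (work : List Int) (h : ∀ x ∈ work, x ≠ 0) :
    (((work.filter (fun x => PySem.Int.mod x 2 = 0)).map (fun x => PySem.Int.floordiv x 2)).map Int.natAbs).sum
      + ((work.filter (fun x => PySem.Int.mod x 2 = 0)).map (fun x => PySem.Int.floordiv x 2)).length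
      ≤ (work.map Int.natAbs).sum := by
  induction work with
  | nil => simp
  | cons x t ih =>
      have hx : x ≠ 0 := h x (List.mem_cons_self ..)
      have ht := ih (fun y hy => h y (List.mem_cons_of_mem _ hy))
      by_cases h2 : PySem.Int.mod x 2 = 0
      · obtain ⟨hm0, hm⟩ := even_split x hx h2
        have hnat : x.natAbs = 2 * (PySem.Int.floordiv x 2).natAbs := by omega
        have hmz : (PySem.Int.floordiv x 2).natAbs ≠ 0 := Int.natAbs_ne_zero.mpr hm0
        simp only [List.map_cons, List.sum_cons, List.filter_cons, h2, decide_true, if_true,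
          List.length_cons]
        omega
      · simp only [List.map_cons, List.sum_cons, List.filter_cons, decide_eq_true_eq, h2,
          if_false]
        omega

-- B's loop invariant: with enough fuel it returns res + Σ v2
theorem layersGo_eq (fuel : Nat) :
    ∀ (res : Int) (work : List Int), (∀ x ∈ work, x ≠ 0) →
      (work.map Int.natAbs).sum < fuel →
      layersGo fuel res work = res + (work.map v2).sum := by
  induction fuel with
  | zero =>
      intro res work h hlt
      omega
  | succ f ih =>
      intro res work h hlt
      match work with
      | [] => simp [layersGo]
      | w :: ws =>
        have hz := layer_nonzero (w :: ws) h
        have hshrink := layer_shrinks (w :: ws) h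
        have hsum := layer_sum (w :: ws) h
        simp only [layersGo]
        by_cases hE : ((w :: ws).filter (fun x => PySem.Int.mod x 2 = 0)).map
            (fun x => PySem.Int.floordiv x 2) = []
        · rw [hE] at hsum ⊢
          simp only [layersGo, List.length_nil, List.map_nil, List.sum_nil,
            Nat.cast_zero, add_zero] at hsum ⊢
          omega
        · have hlen : 0 < (((w :: ws).filter (fun x => PySem.Int.mod x 2 = 0)).map
              (fun x => PySem.Int.floordiv x 2)).length := List.length_pos_iff.mpr hE
          have hflt : ((((w :: ws).filter (fun x => PySem.Int.mod x 2 = 0)).map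
              (fun x => PySem.Int.floordiv x 2)).map Int.natAbs).sum < f := by omega
          rw [ih _ _ hz hflt, hsum]
          ring

-- the two per-element yardsticks agree on nonzero elements
theorem sum_countTwos_eq (a : List Int) (h : ∀ x ∈ a, x ≠ 0) :
    (a.map countTwos).sum = (a.map v2).sum := by
  induction a with
  | nil => rfl
  | cons x t ih =>
      have hx : x ≠ 0 := h x (List.mem_cons_self ..)
      have ht := ih (fun y hy => h y (List.mem_cons_of_mem _ hy))
      simp only [List.map_cons, List.sum_cons, countTwos_eq x hx, ht]

-- ===== VERDICT (by name: the statement is the Claim_ definition above) =====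
theorem solve_spec : Claim_equal_solve := by
  intro N a _ hpre
  unfold Pre_solve at hpre
  unfold Spec_solve solve solve_alt
  rw [layersGo_eq ((a.map Int.natAbs).sum + 1) 0 a hpre (by omega), zero_add]
  exact sum_countTwos_eq a hpre
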